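-- pv_equiv track=rewrite | github.com/aasaandinesh/twitter-analysis | paytm/medical/test.py | get_c_items
-- ===== SOURCE A (Python) =====
-- import itertools
--
-- def get_c_items(c, list):
--     result = []
--     final_result = []
--     for items in itertools.combinations(list, c):
--         s = ""
--         for item in items:
--             s = s + item + " "
--         s.strip()
--         s.strip()
--         result.append(s)
--     for r in result:
--         final_result.append(r.strip())
--
--     return final_result
-- ===== SOURCE B (Python) =====
-- def get_c_items(c, list):
--     out = []
--
--     def walk(remaining, chosen, need):
--         if need == 0:
--             out.append(" ".join(chosen).strip())
--         elif need <= len(remaining):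
--             walk(remaining[1:], chosen + [remaining[0]], need - 1)
--             walk(remaining[1:], chosen, need)
--
--     if c >= 0:
--         walk(list, [], c)
--     return out
-- ===== Notes on version B (the rewrite author's own statement) =====
-- stated objective: alternative
-- what changed: Replaces itertools.combinations plus two string-building passes (concatenate each item with a trailing space, then strip every result in a second loop) by a hand-written include/skip recursive combination generator that emits ' '.join(chosen).strip() directly in itertools' lexicographic order, with length pruning.
import Mathlib
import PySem

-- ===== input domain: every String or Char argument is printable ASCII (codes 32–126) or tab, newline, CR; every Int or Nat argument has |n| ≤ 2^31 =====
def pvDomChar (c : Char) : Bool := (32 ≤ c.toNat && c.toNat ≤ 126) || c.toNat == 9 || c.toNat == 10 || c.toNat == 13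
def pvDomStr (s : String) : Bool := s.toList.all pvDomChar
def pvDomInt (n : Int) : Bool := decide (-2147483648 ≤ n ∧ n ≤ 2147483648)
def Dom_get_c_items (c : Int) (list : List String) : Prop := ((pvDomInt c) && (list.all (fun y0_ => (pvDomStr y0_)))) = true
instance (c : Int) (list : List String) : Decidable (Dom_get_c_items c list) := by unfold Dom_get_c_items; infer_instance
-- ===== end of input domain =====

-- B replaces itertools.combinations + concat-then-strip passes by a recursive include/skip
-- combination generator that emits ' '.join(chosen).strip() directly (alternative decomposition).


-- ===== PORT A =====
-- itertools.combinations(list, k) in its lexicographic emission order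
def pyCombinations : Nat → List String → List (List String)
  | 0, _ => [[]]
  | _ + 1, [] => []
  | k + 1, x :: xs => (pyCombinations k xs).map (fun t => x :: t) ++ pyCombinations (k + 1) xs

def get_c_items (c : Int) (list : List String) : List String :=
  -- for items in combinations: s = ""; for item in items: s = s + item + " "; result.append(s)
  let result : List String := (pyCombinations c.toNat list).foldl
    (fun res items => res ++ [items.foldl (fun s item => s ++ item ++ " ") ""]) []
  -- for r in result: final_result.append(r.strip())
  result.foldl (fun fr r => fr ++ [PySem.Str.strip r]) []

-- ===== PORT B =====
-- walk(remaining, chosen, need) with the output list threaded as an accumulator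
def walkB : List String → List String → Nat → List String → List String
  | _, chosen, 0, out => out ++ [PySem.Str.strip (PySem.Str.join " " chosen)]
  | [], _, _ + 1, out => out
  | r :: rest, chosen, k + 1, out =>
    if k + 1 ≤ (r :: rest).length then
      walkB rest chosen (k + 1) (walkB rest (chosen ++ [r]) k out)
    else out

def get_c_items_alt (c : Int) (list : List String) : List String :=
  if 0 ≤ c then walkB list [] c.toNat [] else []

-- ===== PRECONDITION & SPEC =====
-- Pre_ excludes only negative c, on which Python A raises ValueError from itertools.combinations.
def Pre_get_c_items (c : Int) (list : List String) : Prop := 0 ≤ c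
instance (c : Int) (list : List String) : Decidable (Pre_get_c_items c list) := by unfold Pre_get_c_items; infer_instance
def pvWitness_get_c_items : Int × List String := (2, ["a", "b", "c"])

def Spec_get_c_items (c : Int) (list : List String) (out : List String) : Prop := out = get_c_items_alt c list
instance (c : Int) (list : List String) (out : List String) : Decidable (Spec_get_c_items c list out) := by unfold Spec_get_c_items; infer_instance

-- ===== CLAIM (what is proved, stated in full; the proofs are below) =====
def Claim_equal_get_c_items : Prop := ∀ (c : Int) (list : List String), Dom_get_c_items c list → Pre_get_c_items c list → Spec_get_c_items c list (get_c_items c list)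

-- ===== LEMMAS AND PROOFS =====

-- stripping ignores one trailing space
lemma rstrip_append_space (l : List Char) : PySem.Chars.rstrip (l ++ [' ']) = PySem.Chars.rstrip l := by
  simp [PySem.Chars.rstrip, PySem.Chars.isspace]

lemma strip_append_space (l : List Char) : PySem.Chars.strip (l ++ [' ']) = PySem.Chars.strip l := by
  by_cases h : (List.dropWhile PySem.Chars.isspace l) = []
  · simp [PySem.Chars.strip, PySem.Chars.lstrip, List.dropWhile_append, h,
      PySem.Chars.rstrip, PySem.Chars.isspace]
  · simp [PySem.Chars.strip, PySem.Chars.lstrip, List.dropWhile_append, h]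
    rw [show List.dropWhile PySem.Chars.isspace l ++ [' '] =
        List.dropWhile PySem.Chars.isspace l ++ [' '] from rfl]
    exact rstrip_append_space _

-- concat-with-trailing-space flattening vs join
lemma flatten_space_eq_join (ts : List (List Char)) (hne : ts ≠ []) :
    (ts.map (fun t => t ++ [' '])).flatten = PySem.Chars.join [' '] ts ++ [' '] := by
  induction ts with
  | nil => cases hne rfl
  | cons a rest ih =>
    cases rest with
    | nil => simp [PySem.Chars.join, List.intercalate]
    | cons b r =>
      rw [List.map_cons, List.flatten_cons, ih (by simp), PySem.Chars.join_cons_cons]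
      simp

-- A's inner loop, on char lists
lemma buildS_toList (t : List String) (a : String) :
    (t.foldl (fun s item => s ++ item ++ " ") a).toList
      = a.toList ++ ((t.map String.toList).map (fun l => l ++ [' '])).flatten := by
  induction t generalizing a with
  | nil => simp
  | cons x xs ih => simp [ih, List.append_assoc]

-- per-combination: A's string equals B's string
lemma strip_buildS_eq (t : List String) :
    PySem.Str.strip (t.foldl (fun s item => s ++ item ++ " ") "") = PySem.Str.strip (PySem.Str.join " " t) := by
  rw [← String.toList_inj, PySem.Str.toList_strip, PySem.Str.toList_strip, buildS_toList,
    PySem.Str.toList_join]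
  cases t with
  | nil => simp [PySem.Chars.join, List.intercalate]
  | cons x xs =>
    rw [show ("".toList : List Char) = [] from rfl, List.nil_append,
      flatten_space_eq_join _ (by simp), strip_append_space]
    rfl

lemma pyCombinations_eq_nil_of_lt (k : Nat) (l : List String) (h : l.length < k) :
    pyCombinations k l = [] := by
  induction l generalizing k with
  | nil => cases k with | zero => omega | succ k => rfl
  | cons x xs ih =>
    cases k with
    | zero => omega
    | succ k =>
      simp only [pyCombinations]
      rw [ih k (by simpa using h), ih (k + 1) (by simp at h ⊢; omega)]
      simp

-- B's walk enumerates exactly A's combinations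
lemma walkB_eq (remaining : List String) (chosen : List String) (k : Nat) (out : List String) :
    walkB remaining chosen k out
      = out ++ (pyCombinations k remaining).map
          (fun t => PySem.Str.strip (PySem.Str.join " " (chosen ++ t))) := by
  induction remaining generalizing chosen k out with
  | nil =>
    cases k with
    | zero => simp [walkB, pyCombinations]
    | succ k => simp [walkB, pyCombinations]
  | cons r rest ih =>
    cases k with
    | zero => simp [walkB, pyCombinations]
    | succ k =>
      by_cases h : k + 1 ≤ (r :: rest).length
      · simp only [walkB, if_pos h]
        rw [ih, ih]
        simp [pyCombinations, List.map_map, Function.comp]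
      · simp only [walkB, if_neg h]
        rw [pyCombinations_eq_nil_of_lt (k + 1) (r :: rest) (by simp at h ⊢; omega)]
        simp

-- ===== VERDICT (by name: the statement is the Claim_ definition above) =====
theorem get_c_items_spec : Claim_equal_get_c_items := by
  intro c list _ hpre
  unfold Pre_get_c_items at hpre
  unfold Spec_get_c_items
  simp only [get_c_items, get_c_items_alt]
  rw [if_pos hpre, walkB_eq]
  simp only [List.nil_append]
  rw [PySem.List.foldl_append_singleton_eq_map, List.nil_append,
    PySem.List.foldl_append_singleton_eq_map, List.nil_append, List.map_map]
  exact List.map_congr_left (fun t _ => strip_buildS_eq t)
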